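-- pv_equiv track=rewrite | github.com/groupsum/ssot-registry | pkgs/ssot-core/src/ssot_registry/model/registry.py | _parse_version_triplet
-- ===== SOURCE A (Python) =====
-- def _parse_version_triplet(version: str) -> tuple[int, int, int]:
--     numbers: list[int] = []
--     current = []
--     for char in version:
--         if char.isdigit():
--             current.append(char)
--             continue
--         if current:
--             numbers.append(int("".join(current)))
--             current = []
--         if len(numbers) >= 3:
--             break
--     if current and len(numbers) < 3:
--         numbers.append(int("".join(current)))
--     while len(numbers) < 3:
--         numbers.append(0)
--     return tuple(numbers[:3])
-- ===== SOURCE B (Python) =====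
-- def _parse_version_triplet(version: str) -> tuple[int, int, int]:
--     nums: list[int] = []
--     i, n = 0, len(version)
--     while i < n and len(nums) < 3:
--         if version[i].isdigit():
--             j = i + 1
--             while j < n and version[j].isdigit():
--                 j += 1
--             nums.append(int(version[i:j]))
--             i = j
--         else:
--             i += 1
--     while len(nums) < 3:
--         nums.append(0)
--     return tuple(nums)
-- ===== Notes on version B (the rewrite author's own statement) =====
-- stated objective: alternative
-- what changed: B replaces A's char-by-char accumulator with flush-on-non-digit by a two-pointer scan that extracts each whole digit run at once and converts the slice directly, stopping as soon as three numbers are found.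
import Mathlib
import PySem

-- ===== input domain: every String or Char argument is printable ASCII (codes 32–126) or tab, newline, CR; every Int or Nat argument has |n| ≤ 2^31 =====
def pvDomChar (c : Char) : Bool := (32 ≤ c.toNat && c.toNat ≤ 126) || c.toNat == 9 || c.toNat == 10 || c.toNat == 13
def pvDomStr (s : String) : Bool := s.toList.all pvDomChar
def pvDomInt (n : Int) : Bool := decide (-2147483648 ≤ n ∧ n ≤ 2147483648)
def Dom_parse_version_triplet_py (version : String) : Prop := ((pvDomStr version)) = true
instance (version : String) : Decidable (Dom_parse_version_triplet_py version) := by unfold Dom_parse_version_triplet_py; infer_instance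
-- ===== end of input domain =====

-- B replaces A's char-by-char accumulator (flush on non-digit) by a two-pointer scan that
-- extracts each whole digit run at once; same cost, different loop structure (objective: alternative).

-- int("".join(cs)) on a nonempty digit run; both Pythons share this conversion (never raises there)
def pvToInt (cs : List Char) : Int := (PySem.Int.ofChars? cs).getD 0

-- the shared tail `while len(nums) < 3: nums.append(0); return tuple(nums[:3])`
def pvPad3 (nums : List Int) : Int × Int × Int :=
  match nums with
  | [] => (0, 0, 0)
  | [a] => (a, 0, 0)
  | [a, b] => (a, b, 0)
  | a :: b :: c :: _ => (a, b, c)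

-- ===== PORT A =====
-- A's for-loop: state (numbers, current); flush `current` on a non-digit, break at 3 numbers
def pvALoop (cs : List Char) (nums : List Int) (cur : List Char) : List Int × List Char :=
  match cs with
  | [] => (nums, cur)
  | c :: rest =>
    if PySem.Chars.isdigit c then pvALoop rest nums (cur ++ [c])
    else
      let nums' := if cur.isEmpty then nums else nums ++ [pvToInt cur]
      if 3 ≤ nums'.length then (nums', [])
      else pvALoop rest nums' []

def parse_version_triplet_py (version : String) : Int × Int × Int :=
  let p := pvALoop version.toList [] []
  pvPad3 (if !p.2.isEmpty && p.1.length < 3 then p.1 ++ [pvToInt p.2] else p.1)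

-- ===== PORT B =====
-- B's while-loop: at each position, either skip a non-digit or consume the whole digit run
-- (the inner `while j < n ...` advance = takeWhile/dropWhile of the digit run)
def pvBLoop (cs : List Char) (nums : List Int) : List Int :=
  match cs with
  | [] => nums
  | c :: rest =>
    if 3 ≤ nums.length then nums
    else if PySem.Chars.isdigit c then
      pvBLoop (rest.dropWhile PySem.Chars.isdigit)
              (nums ++ [pvToInt (c :: rest.takeWhile PySem.Chars.isdigit)])
    else pvBLoop rest nums
termination_by cs.length
decreasing_by
  · exact Nat.lt_succ_of_le (List.length_dropWhile_le _ _)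
  · simp

def parse_version_triplet_py_alt (version : String) : Int × Int × Int :=
  pvPad3 (pvBLoop version.toList [])

-- ===== PRECONDITION & SPEC =====
def Spec_parse_version_triplet_py (version : String) (out : Int × Int × Int) : Prop := out = parse_version_triplet_py_alt version
instance (version : String) (out : Int × Int × Int) : Decidable (Spec_parse_version_triplet_py version out) := by unfold Spec_parse_version_triplet_py; infer_instance

-- ===== CLAIM (what is proved, stated in full; the proofs are below) =====
def Claim_equal_parse_version_triplet_py : Prop := ∀ (version : String), Dom_parse_version_triplet_py version → Spec_parse_version_triplet_py version (parse_version_triplet_py version)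

-- ===== LEMMAS AND PROOFS =====

-- B's loop with a pending (already scanned) digit prefix `cur` of the current run
def pvBPend (cs : List Char) (nums : List Int) (cur : List Char) : List Int :=
  if cur.isEmpty then pvBLoop cs nums
  else pvBLoop (cs.dropWhile PySem.Chars.isdigit)
               (nums ++ [pvToInt (cur ++ cs.takeWhile PySem.Chars.isdigit)])

theorem pvKey (cs : List Char) : ∀ (nums : List Int) (cur : List Char), nums.length < 3 →
    (let p := pvALoop cs nums cur;
     pvPad3 (if !p.2.isEmpty && p.1.length < 3 then p.1 ++ [pvToInt p.2] else p.1))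
      = pvPad3 (pvBPend cs nums cur) := by
  induction cs with
  | nil =>
    intro nums cur h
    by_cases hc : cur.isEmpty <;>
      simp [pvALoop, pvBPend, pvBLoop, hc, h]
  | cons c rest ih =>
    intro nums cur h
    by_cases hd : PySem.Chars.isdigit c
    · have := ih nums (cur ++ [c]) h
      have hne2 : (cur ++ [c]).isEmpty = false := by simp
      simp only [pvBPend, hne2, Bool.not_false] at this
      simp only [pvALoop, hd, if_pos, this, pvBPend]
      by_cases hc : cur.isEmpty
      · have hcur : cur = [] := List.isEmpty_iff.mp hc
        simp [hcur, pvBLoop, hd, Nat.not_le.mpr h, List.takeWhile_cons, List.dropWhile_cons]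
      · simp [hc, List.takeWhile_cons, List.dropWhile_cons, hd, List.append_assoc]
    · by_cases hc : cur.isEmpty
      · have hcur : cur = [] := List.isEmpty_iff.mp hc
        have hlt : ¬ 3 ≤ nums.length := Nat.not_le.mpr h
        simp only [pvALoop, hd, if_neg, Bool.false_eq_true, hcur, List.isEmpty_nil, if_pos, hlt,
          if_false, ite_true]
        rw [ih nums [] h]
        simp [pvBPend, pvBLoop, hd, hlt]
      · have hne : ¬ cur = [] := fun e => hc (by simp [e])
        have hrhs : pvBPend (c :: rest) nums cur = pvBLoop (c :: rest) (nums ++ [pvToInt cur]) := by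
          simp [pvBPend, hc, List.takeWhile_cons, List.dropWhile_cons, hd]
        by_cases h3 : 3 ≤ (nums ++ [pvToInt cur]).length
        · have h2 : 2 ≤ nums.length := by simp at h3; omega
          simp only [pvALoop, hd, Bool.false_eq_true, hc, ite_false, h3, if_pos]
          simp [hrhs, pvBLoop, h2]
        · have h2 : ¬ 2 ≤ nums.length := by simp at h3 ⊢; omega
          simp only [pvALoop, hd, Bool.false_eq_true, hc, ite_false, h3, if_neg]
          rw [ih (nums ++ [pvToInt cur]) [] (by simp at h3 ⊢; omega)]
          simp [pvBPend, pvBLoop, h2, hd, hne]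

-- ===== VERDICT (by name: the statement is the Claim_ definition above) =====
theorem parse_version_triplet_py_spec : Claim_equal_parse_version_triplet_py := by
  intro version _
  unfold Spec_parse_version_triplet_py parse_version_triplet_py parse_version_triplet_py_alt
  have := pvKey version.toList [] [] (by simp)
  simpa [pvBPend] using this
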